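-- pv_equiv track=rewrite | github.com/rmovva/writing | scripts/fetch_openings.py | extract_opening
-- ===== SOURCE A (Python) =====
-- from typing import Dict, Iterable, List, Optional
--
-- DEFAULT_WORDS = 500
--
-- def extract_opening(text: str, max_words: int = DEFAULT_WORDS) -> str:
--     clean_text = text.replace("\r\n", "\n").strip()
--     paragraphs = [p.strip() for p in clean_text.split("\n\n") if p.strip()]
--     selected: List[str] = []
--     word_total = 0
--     for para in paragraphs:
--         words = para.split()
--         word_total += len(words)
--         selected.append(para)
--         if word_total >= max_words:
--             break
--     return "\n\n".join(selected)
-- ===== SOURCE B (Python) =====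
-- DEFAULT_WORDS = 500
--
-- def extract_opening(text: str, max_words: int = DEFAULT_WORDS) -> str:
--     clean_text = text.replace("\r\n", "\n").strip()
--     paragraphs = [p.strip() for p in clean_text.split("\n\n") if p.strip()]
--     counts = [len(p.split()) for p in paragraphs]
--     cum = [sum(counts[:i + 1]) for i in range(len(counts))]
--     cut = next((i + 1 for i, t in enumerate(cum) if t >= max_words), len(paragraphs))
--     return "\n\n".join(paragraphs[:cut])
-- ===== Notes on version B (the rewrite author's own statement) =====
-- stated objective: alternative
-- what changed: Replaces A's fused accumulate-and-break loop with separate passes: per-paragraph word counts, prefix sums, a first-index-over-threshold search, then a slice and join.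
import Mathlib
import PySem

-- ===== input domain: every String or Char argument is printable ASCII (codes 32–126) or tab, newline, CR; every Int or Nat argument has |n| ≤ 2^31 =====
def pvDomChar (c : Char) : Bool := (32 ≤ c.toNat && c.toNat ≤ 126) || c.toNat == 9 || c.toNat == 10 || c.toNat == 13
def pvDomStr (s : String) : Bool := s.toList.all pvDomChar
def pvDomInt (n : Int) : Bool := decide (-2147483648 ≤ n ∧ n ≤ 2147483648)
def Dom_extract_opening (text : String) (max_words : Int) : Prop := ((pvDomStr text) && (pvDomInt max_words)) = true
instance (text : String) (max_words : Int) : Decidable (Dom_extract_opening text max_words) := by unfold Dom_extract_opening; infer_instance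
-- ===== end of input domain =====

-- B replaces A's fused accumulate-and-break loop with separate passes: per-paragraph word
-- counts, prefix sums, a first-index search, then a slice (alternative decomposition, same cost).

-- ===== PORT A =====
-- shared preprocessing of A (and, textually identical in B): normalize, strip, split into paragraphs
def pvParas (text : String) : List String :=
  let clean := PySem.Str.strip (PySem.Str.replace text "\r\n" "\n")
  (((PySem.Str.split? clean "\n\n").getD []).filter (fun p => PySem.Str.strip p ≠ "")).map PySem.Str.strip

-- A's for-loop with break, as structural recursion over (paragraphs, word_total)
def pvALoop (paras : List String) (word_total : Int) (max_words : Int) : List String :=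
  match paras with
  | [] => []
  | p :: rest =>
    let t := word_total + PySem.List.len (PySem.Str.split₀ p)
    if max_words ≤ t then [p] else p :: pvALoop rest t max_words

def extract_opening (text : String) (max_words : Int) : String :=
  PySem.Str.join "\n\n" (pvALoop (pvParas text) 0 max_words)

-- ===== PORT B =====
def pvCum (paras : List String) : List Int :=
  let counts := paras.map (fun p => PySem.List.len (PySem.Str.split₀ p))
  (List.range counts.length).map (fun i => ((counts.take (i + 1)).foldl (· + ·) 0))

def extract_opening_alt (text : String) (max_words : Int) : String :=
  let paragraphs := pvParas text
  let cum := pvCum paragraphs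
  let cut := match cum.findIdx? (fun t => max_words ≤ t) with
             | some i => i + 1
             | none => paragraphs.length
  PySem.Str.join "\n\n" (paragraphs.take cut)

-- ===== PRECONDITION & SPEC =====
def Spec_extract_opening (text : String) (max_words : Int) (out : String) : Prop := out = extract_opening_alt text max_words
instance (text : String) (max_words : Int) (out : String) : Decidable (Spec_extract_opening text max_words out) := by unfold Spec_extract_opening; infer_instance

-- ===== CLAIM (what is proved, stated in full; the proofs are below) =====
def Claim_equal_extract_opening : Prop := ∀ (text : String) (max_words : Int), Dom_extract_opening text max_words → Spec_extract_opening text max_words (extract_opening text max_words)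

-- ===== LEMMAS AND PROOFS =====

-- ===== VERDICT (by name: the statement is the Claim_ definition above) =====
lemma pvFoldl_add_shift (l : List Int) (a : Int) :
    l.foldl (· + ·) a = a + l.foldl (· + ·) 0 := by
  induction l generalizing a with
  | nil => simp
  | cons x xs ih => simp only [List.foldl_cons]; rw [ih (a + x), ih (0 + x)]; ring

lemma pvCum_cons (p : String) (rest : List String) :
    pvCum (p :: rest) =
      PySem.List.len (PySem.Str.split₀ p) ::
        (pvCum rest).map (fun t => PySem.List.len (PySem.Str.split₀ p) + t) := by
  unfold pvCum
  simp only [List.map_cons, List.length_cons, List.range_succ_eq_map, List.map_map]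
  congr 1
  · simp
  apply List.map_congr_left
  intro i _
  simp only [Function.comp, Nat.succ_eq_add_one]
  rw [List.take_succ_cons, List.foldl_cons, pvFoldl_add_shift]
  ring_nf

lemma pvLoop_take (paras : List String) (m total : Int) :
    pvALoop paras total m =
      paras.take (match (pvCum paras).findIdx? (fun t => m - total ≤ t) with
                  | some i => i + 1
                  | none => paras.length) := by
  induction paras generalizing total with
  | nil => simp [pvALoop, pvCum]
  | cons p rest ih =>
    rw [pvCum_cons, List.findIdx?_cons]
    unfold pvALoop
    by_cases h : m - total ≤ PySem.List.len (PySem.Str.split₀ p)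
    · simp only [h, decide_true, if_pos]
      rw [if_pos (by omega)]
      simp
    · simp only [h, decide_false]
      rw [if_neg (by omega)]
      rw [List.findIdx?_map]
      have hpred : ((fun t => decide (m - total ≤ t)) ∘
            (fun t => PySem.List.len (PySem.Str.split₀ p) + t)) =
          (fun t => decide (m - (total + PySem.List.len (PySem.Str.split₀ p)) ≤ t)) := by
        funext t
        simp only [Function.comp]
        by_cases ht : m - (total + PySem.List.len (PySem.Str.split₀ p)) ≤ t
        · rw [decide_eq_true (by omega), decide_eq_true ht]
        · rw [decide_eq_false (by omega), decide_eq_false ht]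
      rw [hpred, ih (total + PySem.List.len (PySem.Str.split₀ p))]
      cases (pvCum rest).findIdx? (fun t =>
          decide (m - (total + PySem.List.len (PySem.Str.split₀ p)) ≤ t)) with
      | none => simp
      | some i => simp

theorem extract_opening_spec : Claim_equal_extract_opening := by
  intro text max_words _
  show _ = _
  unfold extract_opening extract_opening_alt
  rw [pvLoop_take (pvParas text) max_words 0]
  simp
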